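-- pv_equiv track=rewrite | github.com/codesquad-backend-study/algorithm-study | 모의고사/2019_카카오_개발자_겨울_인턴십/징검다리 건너기.py | go_check
-- ===== SOURCE A (Python) =====
-- def go_check(stones, n, k):
--     skip = 1
--     for stone in stones:
--         if stone <= n:
--             skip += 1
--             if skip > k:
--                 return False
--         else:
--             skip = 1
--     return True
-- ===== SOURCE B (Python) =====
-- def go_check(stones, n, k):
--     # Group-then-measure: walk the list run by run; for each maximal run of
--     # stones <= n, measure its full length with an inner scan and compare to k once.
--     m = len(stones)
--     i = 0
--     while i < m:
--         if stones[i] > n: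
--             i += 1
--         else:
--             j = i
--             while j < m and stones[j] <= n:
--                 j += 1
--             if j - i >= k:
--                 return False
--             i = j
--     return True
-- ===== Notes on version B (the rewrite author's own statement) =====
-- stated objective: alternative
-- what changed: Replaces the streaming skip-counter with early exit by a group-then-measure scan: each maximal run of qualifying stones is measured in full by an inner scan and its length compared to k once.
import Mathlib
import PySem

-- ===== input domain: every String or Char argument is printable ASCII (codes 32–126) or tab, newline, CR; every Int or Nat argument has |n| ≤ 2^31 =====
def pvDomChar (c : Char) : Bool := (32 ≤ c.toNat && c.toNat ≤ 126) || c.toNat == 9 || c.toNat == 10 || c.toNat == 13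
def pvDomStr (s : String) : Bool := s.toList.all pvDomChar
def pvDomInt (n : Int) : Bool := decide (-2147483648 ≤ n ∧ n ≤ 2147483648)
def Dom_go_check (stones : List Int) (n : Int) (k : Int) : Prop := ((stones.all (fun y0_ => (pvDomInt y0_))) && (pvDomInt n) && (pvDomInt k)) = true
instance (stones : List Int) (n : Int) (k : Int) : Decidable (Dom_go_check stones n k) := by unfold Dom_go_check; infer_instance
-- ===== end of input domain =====

-- B replaces A's streaming skip-counter by a group-then-measure index scan over maximal runs
-- (alternative decomposition, same O(n) cost); return values proved equal on all inputs.

-- ===== PORT A =====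
-- A's for-loop over stones carrying the mutable counter `skip` (starts at 1).
def goCheckLoopA (stones : List Int) (n : Int) (k : Int) (skip : Int) : Bool :=
  match stones with
  | [] => true
  | stone :: rest =>
      if stone ≤ n then
        if skip + 1 > k then false
        else goCheckLoopA rest n k (skip + 1)
      else goCheckLoopA rest n k 1

def go_check (stones : List Int) (n : Int) (k : Int) : Bool :=
  goCheckLoopA stones n k 1

-- ===== PORT B =====
-- B's inner while-loop: advance j while j < m and stones[j] <= n.
def runEndB (stones : List Int) (n : Int) (m : Nat) (j : Nat) : Nat :=
  if _h : j < m then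
    match stones[j]? with
    | some s => if s ≤ n then runEndB stones n m (j + 1) else j
    | none => j
  else j
  termination_by m - j

-- used only by goCheckLoopB's termination proof
theorem runEndB_ge (stones : List Int) (n : Int) (m : Nat) (j : Nat) :
    j ≤ runEndB stones n m j := by
  induction hd : m - j using Nat.strong_induction_on generalizing j with
  | _ d ih =>
    unfold runEndB
    split
    · next hj =>
        match hs : stones[j]? with
        | some s =>
            by_cases hsn : s ≤ n
            · simp only [hsn, if_true]
              have := ih (m - (j + 1)) (by omega) (j + 1) rfl
              omega
            · simp [hsn]
        | none => simp
    · exact le_rfl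

-- B's outer while-loop over the index i.
def goCheckLoopB (stones : List Int) (n : Int) (k : Int) (m : Nat) (i : Nat) : Bool :=
  if _h : i < m then
    match hs : stones[i]? with
    | some s =>
        if s > n then goCheckLoopB stones n k m (i + 1)
        else
          let j := runEndB stones n m i
          if ((j - i : Nat) : Int) ≥ k then false
          else goCheckLoopB stones n k m j
    | none => true
  else true
  termination_by m - i
  decreasing_by
  · omega
  · have h1 : runEndB stones n m i = runEndB stones n m (i + 1) := by
      rw [runEndB]
      simp [_h, hs, not_lt.mp (by assumption : ¬ s > n)]
    have h2 := runEndB_ge stones n m (i + 1)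
    omega

def go_check_alt (stones : List Int) (n : Int) (k : Int) : Bool :=
  goCheckLoopB stones n k stones.length 0

-- ===== PRECONDITION & SPEC =====
def Spec_go_check (stones : List Int) (n : Int) (k : Int) (out : Bool) : Prop := out = go_check_alt stones n k
instance (stones : List Int) (n : Int) (k : Int) (out : Bool) : Decidable (Spec_go_check stones n k out) := by unfold Spec_go_check; infer_instance

-- ===== CLAIM (what is proved, stated in full; the proofs are below) =====
def Claim_equal_go_check : Prop := ∀ (stones : List Int) (n : Int) (k : Int), Dom_go_check stones n k → Spec_go_check stones n k (go_check stones n k)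

-- ===== LEMMAS AND PROOFS =====

-- The length of the maximal qualifying prefix run of a list (proof-side abstraction).
def runLenP (l : List Int) (n : Int) : Nat :=
  match l with
  | [] => 0
  | x :: xs => if x ≤ n then runLenP xs n + 1 else 0

-- A's loop ignores `skip` (resetting it to 1) when the head is non-qualifying.
theorem goCheckLoopA_reset (xs : List Int) (x n k skip : Int) (hx : ¬ x ≤ n) :
    goCheckLoopA (x :: xs) n k skip = goCheckLoopA xs n k 1 := by
  simp [goCheckLoopA, hx]

-- Key invariant for A: running its loop with counter c is the same as measuring the
-- whole leading run at once (extended by the c-1 stones already counted) and then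
-- restarting after the run.
theorem goCheckLoopA_run (n k : Int) (l : List Int) (c : Int) :
    goCheckLoopA l n k c =
      (if (runLenP l n : Int) ≥ 1 ∧ c - 1 + (runLenP l n : Int) ≥ k then false
       else goCheckLoopA (l.drop (runLenP l n)) n k 1) := by
  induction l generalizing c with
  | nil => simp [runLenP, goCheckLoopA]
  | cons x xs ih =>
      by_cases hx : x ≤ n
      · have hrl : runLenP (x :: xs) n = runLenP xs n + 1 := by simp [runLenP, hx]
        rw [hrl]
        by_cases hk : c + 1 > k
        · have hA : goCheckLoopA (x :: xs) n k c = false := by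
            simp [goCheckLoopA, hx, hk]
          have hcond : ((runLenP xs n + 1 : Nat) : Int) ≥ 1 ∧ c - 1 + ((runLenP xs n + 1 : Nat) : Int) ≥ k := by
            constructor <;> push_cast <;> omega
          rw [hA, if_pos hcond]
        · have hstep : goCheckLoopA (x :: xs) n k c = goCheckLoopA xs n k (c + 1) := by
            simp [goCheckLoopA, hx, hk]
          rw [hstep, ih (c + 1)]
          simp only [List.drop_succ_cons]
          by_cases hr : (runLenP xs n : Int) ≥ 1 ∧ (c + 1) - 1 + (runLenP xs n : Int) ≥ k
          · have hcond : ((runLenP xs n + 1 : Nat) : Int) ≥ 1 ∧ c - 1 + ((runLenP xs n + 1 : Nat) : Int) ≥ k := by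
              constructor <;> push_cast <;> omega
            rw [if_pos hr, if_pos hcond]
          · have hcond : ¬ (((runLenP xs n + 1 : Nat) : Int) ≥ 1 ∧ c - 1 + ((runLenP xs n + 1 : Nat) : Int) ≥ k) := by
              push_cast at hr ⊢
              omega
            rw [if_neg hr, if_neg hcond]
      · have hrl : runLenP (x :: xs) n = 0 := by simp [runLenP, hx]
        rw [hrl, if_neg (by simp), List.drop_zero,
          goCheckLoopA_reset xs x n k c hx, goCheckLoopA_reset xs x n k 1 hx]

-- B's inner scan computes i plus the qualifying-prefix length of the suffix at i.
theorem runEndB_eq (stones : List Int) (n : Int) (i : Nat) :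
    runEndB stones n stones.length i = i + runLenP (stones.drop i) n := by
  induction hd : stones.length - i using Nat.strong_induction_on generalizing i with
  | _ d ih =>
    by_cases hi : i < stones.length
    · have hcons : stones.drop i = stones[i] :: stones.drop (i + 1) :=
        List.drop_eq_getElem_cons hi
      rw [runEndB, dif_pos hi, List.getElem?_eq_getElem hi, hcons, runLenP]
      show (if stones[i] ≤ n then runEndB stones n stones.length (i + 1) else i) = _
      by_cases hsn : stones[i] ≤ n
      · have hrec := ih (stones.length - (i + 1)) (by omega) (i + 1) rfl
        rw [if_pos hsn, if_pos hsn, hrec]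
        omega
      · rw [if_neg hsn, if_neg hsn]; omega
    · have hdrop : stones.drop i = [] := List.drop_eq_nil_of_le (by omega)
      rw [runEndB, dif_neg hi, hdrop]
      simp [runLenP]

-- B's outer loop at index i equals A's loop (with a fresh counter) on the suffix at i.
theorem loopB_eq_loopA_suffix (stones : List Int) (n k : Int) (i : Nat) :
    goCheckLoopB stones n k stones.length i = goCheckLoopA (stones.drop i) n k 1 := by
  induction hd : stones.length - i using Nat.strong_induction_on generalizing i with
  | _ d ih =>
    by_cases hi : i < stones.length
    · have hcons : stones.drop i = stones[i] :: stones.drop (i + 1) :=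
        List.drop_eq_getElem_cons hi
      rw [goCheckLoopB, dif_pos hi, List.getElem?_eq_getElem hi]
      split
      case h_2 hs => exact absurd hs (by simp)
      case h_1 s hs =>
      obtain rfl : stones[i] = s := by injection hs
      by_cases hsn : stones[i] > n
      · rw [if_pos hsn, ih (stones.length - (i + 1)) (by omega) (i + 1) rfl,
          hcons, goCheckLoopA_reset _ _ _ _ _ (not_le.mpr hsn)]
      · rw [if_neg hsn]
        have hrE := runEndB_eq stones n i
        have hrl : runLenP (stones.drop i) n = runLenP (stones.drop (i + 1)) n + 1 := by
          rw [hcons, runLenP, if_pos (not_lt.mp hsn)]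
        rw [goCheckLoopA_run n k (stones.drop i) 1]
        have hpos : (runLenP (stones.drop i) n : Int) ≥ 1 ∧
            1 - 1 + (runLenP (stones.drop i) n : Int) ≥ k ↔ (runLenP (stones.drop i) n : Int) ≥ k := by
          rw [hrl]; push_cast; omega
        have hsub : ((runEndB stones n stones.length i - i : Nat) : Int) = (runLenP (stones.drop i) n : Int) := by
          rw [hrE]; omega
        by_cases hge : (runLenP (stones.drop i) n : Int) ≥ k
        · rw [if_pos (hpos.mpr hge)]
          simp only [hsub, hge, if_true]
        · rw [if_neg (fun h => hge (hpos.mp h))]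
          simp only [hsub, hge, if_false]
          have hlt : i < runEndB stones n stones.length i := by rw [hrE, hrl]; omega
          rw [ih (stones.length - runEndB stones n stones.length i) (by omega)
            (runEndB stones n stones.length i) rfl, hrE, ← List.drop_drop]
    · have hdrop : stones.drop i = [] := List.drop_eq_nil_of_le (by omega)
      rw [goCheckLoopB]
      simp [hi, hdrop, goCheckLoopA]

-- ===== VERDICT (by name: the statement is the Claim_ definition above) =====
theorem go_check_spec : Claim_equal_go_check := by
  intro stones n k _
  show go_check stones n k = go_check_alt stones n k
  unfold go_check go_check_alt
  rw [loopB_eq_loopA_suffix stones n k 0, List.drop_zero]
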